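-- pv_equiv track=rewrite | github.com/carleton-cs-energy-analytics/point-analysis | analysis-tools/point-analyzer.py | point_name_first_components
-- ===== SOURCE A (Python) =====
-- def point_name_first_components(points):
--     ''' Computes a list of the prefixes up to the first period in each point name.
--         If a point does not include a period, then its name is not included in
--         the returned results. Returns a list of (prefix, count) 2-tuples
--         (where count is the number of points whose names start with prefix),
--         sorted in decreasing order by count. '''
--     prefixes = {}
--     for name in points:
--         index = name.find('.')
--         if index >= 0:
--             prefix = name[:index]
--             prefixes[prefix] = prefixes.get(prefix, 0) + 1
--     return sorted(prefixes.items(), key=lambda x: (x[1], x[0]), reverse=True)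
-- ===== SOURCE B (Python) =====
-- def point_name_first_components(points):
--     # sort-then-group: sort the prefixes, count runs of equal prefixes, then
--     # sort the (prefix, count) pairs with the same key/reverse as the original.
--     prefixes = sorted(name[:name.find('.')] for name in points if name.find('.') >= 0)
--     counts = []
--     cur = None
--     cnt = 0
--     for p in prefixes:
--         if cur == p:
--             cnt += 1
--         else:
--             if cur is not None:
--                 counts.append((cur, cnt))
--             cur, cnt = p, 1
--     if cur is not None:
--         counts.append((cur, cnt))
--     counts.sort(key=lambda x: (x[1], x[0]), reverse=True)
--     return counts
-- ===== Notes on version B (the rewrite author's own statement) =====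
-- stated objective: alternative
-- what changed: Replaces the dict-accumulation counting with a sort-then-group pass: the extracted prefixes are sorted and runs of equal prefixes are counted in one linear scan, before the same final (count, prefix) reverse sort.
import Mathlib
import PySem

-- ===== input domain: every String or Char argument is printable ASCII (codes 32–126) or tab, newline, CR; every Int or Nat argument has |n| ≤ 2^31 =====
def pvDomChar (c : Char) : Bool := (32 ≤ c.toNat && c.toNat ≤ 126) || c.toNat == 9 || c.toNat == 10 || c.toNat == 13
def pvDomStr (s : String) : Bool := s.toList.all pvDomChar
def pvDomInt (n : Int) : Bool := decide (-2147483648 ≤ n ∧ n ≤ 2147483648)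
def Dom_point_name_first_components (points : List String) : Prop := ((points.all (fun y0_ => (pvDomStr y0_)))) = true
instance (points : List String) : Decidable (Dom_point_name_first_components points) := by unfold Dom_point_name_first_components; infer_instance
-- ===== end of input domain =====

-- B replaces A's dict-accumulation counting with a sort-then-group run-length pass (alternative algorithm, same final sort).

-- ===== PORT A =====
def point_name_first_components (points : List String) : List (String × Int) :=
  let prefixes := points.foldl (fun (d : PySem.Dict String Int) name =>
    let index := PySem.Str.find name "."
    if index ≥ 0 then
      let pre := PySem.Str.slice name none (some index)
      d.insert pre (d.getD pre 0 + 1)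
    else d) PySem.Dict.empty
  PySem.List.sorted2 prefixes.items (fun x => x.2) (fun x => x.1) true

-- ===== PORT B =====
-- the body of B's run-counting loop (cur = none ↔ Python's cur is None)
def pvStep (s : List (String × Int) × Option String × Int) (p : String) :
    List (String × Int) × Option String × Int :=
  match s with
  | (acc, some c, n) => if c = p then (acc, some c, n + 1) else (acc ++ [(c, n)], some p, 1)
  | (acc, none, _) => (acc, some p, 1)

def point_name_first_components_alt (points : List String) : List (String × Int) :=
  let prefixes := PySem.List.sorted
    ((points.filter (fun name => decide (PySem.Str.find name "." ≥ 0))).map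
      (fun name => PySem.Str.slice name none (some (PySem.Str.find name "."))))
    (fun s => s) false
  let st := prefixes.foldl pvStep ([], none, 0)
  let counts := match st with
    | (acc, some c, n) => acc ++ [(c, n)]
    | (acc, none, _) => acc
  PySem.List.sorted2 counts (fun x => x.2) (fun x => x.1) true

-- ===== PRECONDITION & SPEC =====
def Spec_point_name_first_components (points : List String) (out : List (String × Int)) : Prop := out = point_name_first_components_alt points
instance (points : List String) (out : List (String × Int)) : Decidable (Spec_point_name_first_components points out) := by unfold Spec_point_name_first_components; infer_instance

-- ===== CLAIM (what is proved, stated in full; the proofs are below) =====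
def Claim_equal_point_name_first_components : Prop := ∀ (points : List String), Dom_point_name_first_components points → Spec_point_name_first_components points (point_name_first_components points)

-- ===== LEMMAS AND PROOFS =====

-- the lexicographic sort key (count, prefix) shared by both final sorts
def pvK (x : String × Int) : Lex (Int × String) := toLex (x.2, x.1)

-- the prefix of one name, and the list of prefixes of all dotted names
def pvPref (name : String) : String :=
  PySem.Str.slice name none (some (PySem.Str.find name "."))

def pvL (points : List String) : List String :=
  (points.filter (fun name => decide (PySem.Str.find name "." ≥ 0))).map pvPref

-- run-length accumulation over a list, carrying the current run (c, n)
def pvRleAux : String → Int → List String → List (String × Int)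
  | c, n, [] => [(c, n)]
  | c, n, y :: ys => if c = y then pvRleAux c (n + 1) ys else (c, n) :: pvRleAux y 1 ys

def pvRle : List String → List (String × Int)
  | [] => []
  | x :: xs => pvRleAux x 1 xs

lemma pvK_injective : Function.Injective pvK := by
  intro a b h
  have h' : ((a.2, a.1) : Int × String) = (b.2, b.1) := congrArg ofLex h
  exact Prod.ext (congrArg Prod.snd h') (congrArg Prod.fst h')

-- the tuple-key reverse sort is the reverse sort under the lexicographic key pvK
lemma pv_sorted2_lex (xs : List (String × Int)) :
    PySem.List.sorted2 xs (fun x => x.2) (fun x => x.1) true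
      = PySem.List.sorted xs pvK true := by
  show List.foldl (fun acc x => PySem.List.insertBy (fun a b =>
        decide (b.2 < a.2) || (!decide (a.2 < b.2) && decide (b.1 < a.1))) x acc) [] xs
    = List.foldl (fun acc x => PySem.List.insertBy (fun a b => decide (pvK b < pvK a)) x acc) [] xs
  congr 1
  funext acc x
  congr 1
  funext a b
  simp only [pvK, Prod.Lex.lt_iff, ofLex_toLex]
  by_cases h1 : (b.2:Int) < a.2 <;> by_cases h2 : (a.2:Int) < b.2 <;>
    simp [h1, h2, show ¬ (b.2 < a.2) → ¬ (a.2 < b.2) → b.2 = a.2 from by omega]; omega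

-- A's dict loop is Counter(pvL points): its items pair each distinct prefix with its count
lemma pv_items_eq (points : List String) :
    (points.foldl (fun (d : PySem.Dict String Int) name =>
        let index := PySem.Str.find name "."
        if index ≥ 0 then
          let pre := PySem.Str.slice name none (some index)
          d.insert pre (d.getD pre 0 + 1)
        else d) PySem.Dict.empty).items
      = (PySem.Set.ofList (pvL points)).map (fun k => (k, ((pvL points).count k : Int))) := by
  rw [show (fun (d : PySem.Dict String Int) name =>
        let index := PySem.Str.find name "."
        if index ≥ 0 then
          let pre := PySem.Str.slice name none (some index)
          d.insert pre (d.getD pre 0 + 1)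
        else d)
      = (fun d name => if PySem.Str.find name "." ≥ 0 then
          d.insert (pvPref name) (d.getD (pvPref name) 0 + 1) else d) from rfl]
  have e1 := PySem.List.foldl_ite_eq_foldl_filter
    (p := fun name => PySem.Str.find name "." ≥ 0)
    (f := fun (d : PySem.Dict String Int) name =>
      d.insert (pvPref name) (d.getD (pvPref name) 0 + 1)) (l := points)
    (init := PySem.Dict.empty)
  simp only [e1]
  have e2 : (pvL points).foldl
      (fun (d : PySem.Dict String Int) x => d.insert x (d.getD x 0 + 1)) PySem.Dict.empty
      = List.foldl
          (fun (d : PySem.Dict String Int) name =>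
            d.insert (pvPref name) (d.getD (pvPref name) 0 + 1))
          PySem.Dict.empty (points.filter (fun name => decide (PySem.Str.find name "." ≥ 0))) := by
    simp only [pvL, List.foldl_map]
  simp only [← e2]
  rw [PySem.Dict.foldl_insert_getD_add_one_eq_counter, PySem.Dict.items_counter]

-- B's loop with finalisation is pvRleAux
lemma pv_loop_eq (xs : List String) : ∀ (acc : List (String × Int)) (c : String) (n : Int),
    (match xs.foldl pvStep (acc, some c, n) with
      | (a, some d, m) => a ++ [(d, m)]
      | (a, none, _) => a) = acc ++ pvRleAux c n xs := by
  induction xs with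
  | nil => intro acc c n; simp [pvRleAux]
  | cons y ys ih =>
    intro acc c n
    by_cases h : c = y
    · simp only [List.foldl_cons, pvStep, if_pos h, pvRleAux, ih]
    · simp only [List.foldl_cons, pvStep, if_neg h, pvRleAux, ih, List.append_assoc,
        List.singleton_append]

lemma pv_counts_eq (xs : List String) :
    (match xs.foldl pvStep ([], none, 0) with
      | (a, some d, m) => a ++ [(d, m)]
      | (a, none, _) => a) = pvRle xs := by
  cases xs with
  | nil => rfl
  | cons x xs =>
    simp only [List.foldl_cons, pvStep, pvRle]
    exact pv_loop_eq xs [] x 1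

-- structure of pvRleAux on a sorted tail: values are counts, firsts are distinct, members are exactly {x} ∪ xs
lemma pvRleAux_facts (xs : List String) : ∀ (x : String) (n : Int),
    (∀ y ∈ xs, x ≤ y) → xs.Pairwise (· ≤ ·) →
    (∀ p ∈ pvRleAux x n xs,
        (p.1 = x ∧ p.2 = n + (xs.count x : Int)) ∨
        (p.1 ≠ x ∧ p.1 ∈ xs ∧ p.2 = (xs.count p.1 : Int)))
    ∧ ((pvRleAux x n xs).map Prod.fst).Nodup
    ∧ (∀ k, k ∈ (pvRleAux x n xs).map Prod.fst ↔ k = x ∨ k ∈ xs) := by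
  induction xs with
  | nil => intro x n _ _; simp [pvRleAux]
  | cons y ys ih =>
    intro x n hle hpw
    rcases List.pairwise_cons.1 hpw with ⟨hyle, hys⟩
    by_cases hxy : x = y
    · subst hxy
      obtain ⟨h1, h2, h3⟩ := ih x (n + 1) hyle hys
      have hun : pvRleAux x n (x :: ys) = pvRleAux x (n + 1) ys := by
        simp [pvRleAux]
      rw [hun]
      refine ⟨fun p hp => ?_, h2, fun k => by rw [h3 k]; simp⟩
      rcases h1 p hp with ⟨he, hv⟩ | ⟨hne, hm, hv⟩
      · exact Or.inl ⟨he, by rw [hv, List.count_cons_self]; push_cast; ring⟩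
      · exact Or.inr ⟨hne, List.mem_cons_of_mem _ hm,
          by rw [hv, List.count_cons_of_ne (Ne.symm hne)]⟩
    · have hxley : x ≤ y := hle y (List.mem_cons_self ..)
      have hxlty : x < y := lt_of_le_of_ne hxley hxy
      have hxnotin : x ∉ ys := fun hx =>
        absurd (hyle x hx) (not_le.2 hxlty)
      have hcnt0 : (y :: ys).count x = 0 :=
        List.count_eq_zero.2 (by simp [hxy, hxnotin])
      obtain ⟨h1, h2, h3⟩ := ih y 1 hyle hys
      have hun : pvRleAux x n (y :: ys) = (x, n) :: pvRleAux y 1 ys := by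
        simp [pvRleAux, hxy]
      rw [hun]
      refine ⟨fun p hp => ?_, ?_, fun k => ?_⟩
      · rcases List.mem_cons.1 hp with hp | hp
        · subst hp
          exact Or.inl ⟨rfl, by rw [hcnt0]; push_cast; ring⟩
        · rcases h1 p hp with ⟨he, hv⟩ | ⟨hne, hm, hv⟩
          · refine Or.inr ⟨by rw [he]; exact Ne.symm hxy, by rw [he]; exact List.mem_cons_self .., ?_⟩
            rw [hv, he, List.count_cons_self]; push_cast; ring
          · refine Or.inr ⟨fun hpx => hxnotin (hpx ▸ hm), List.mem_cons_of_mem _ hm, ?_⟩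
            rw [hv, List.count_cons_of_ne (Ne.symm hne)]
      · simp only [List.map_cons, List.nodup_cons]
        refine ⟨fun hx => ?_, h2⟩
        rcases (h3 x).1 hx with he | hm
        · exact hxy he
        · exact hxnotin hm
      · simp only [List.map_cons, List.mem_cons, h3 k]

-- pvRle of the sorted prefix list is a permutation of Counter(pvL)'s items
lemma pv_rle_perm (L : List String) :
    (pvRle (PySem.List.sorted L (fun s => s) false)).Perm
      ((PySem.Set.ofList L).map (fun k => (k, (L.count k : Int)))) := by
  cases hS : PySem.List.sorted L (fun s => s) false with
  | nil =>
    have hL : L = [] := (PySem.List.sorted_eq_nil_iff ..).1 hS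
    subst hL
    simp [pvRle, PySem.Set.ofList]
  | cons x xs =>
    have hperm : (x :: xs).Perm L := hS ▸ PySem.List.sorted_perm L (fun s => s) false
    have hpw : (x :: xs).Pairwise (fun a b => a ≤ b) :=
      hS ▸ PySem.List.sorted_pairwise L (fun s => s)
    rcases List.pairwise_cons.1 hpw with ⟨hle, hxs⟩
    obtain ⟨h1, h2, h3⟩ := pvRleAux_facts xs x 1 hle hxs
    show (pvRleAux x 1 xs).Perm _
    have hR : pvRleAux x 1 xs
        = ((pvRleAux x 1 xs).map Prod.fst).map (fun k => (k, (L.count k : Int))) := by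
      rw [List.map_map]
      conv_lhs => rw [← List.map_id (pvRleAux x 1 xs)]
      refine List.map_congr_left fun p hp => ?_
      rcases h1 p hp with ⟨he, hv⟩ | ⟨_, _, hv⟩
      · have : p.2 = ((x :: xs).count p.1 : Int) := by
          rw [hv, he, List.count_cons_self]; push_cast; ring
        rw [id, Function.comp_apply, ← hperm.count_eq, ← this]
      · have : p.2 = ((x :: xs).count p.1 : Int) := by
          by_cases hpx : p.1 = x
          · rcases h1 p hp with ⟨_, hv'⟩ | ⟨hne, _, _⟩
            · rw [hv', hpx, List.count_cons_self]; push_cast; ring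
            · exact absurd hpx hne
          · rw [hv, List.count_cons_of_ne (Ne.symm hpx)]
        rw [id, Function.comp_apply, ← hperm.count_eq, ← this]
    have hF : ((pvRleAux x 1 xs).map Prod.fst).Perm (PySem.Set.ofList L) := by
      refine (List.perm_ext_iff_of_nodup h2 (PySem.Set.nodup_ofList L)).2 fun k => ?_
      rw [h3 k, PySem.Set.mem_ofList, ← hperm.mem_iff, List.mem_cons]
    rw [hR]
    exact hF.map _

-- two reverse sorts under pvK of permuted nodup lists coincide
lemma pv_sorted_rev_congr (xs ys : List (String × Int)) (h : xs.Perm ys) (hx : xs.Nodup) :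
    PySem.List.sorted xs pvK true = PySem.List.sorted ys pvK true := by
  have hperm : (PySem.List.sorted xs pvK true).Perm xs := PySem.List.sorted_perm xs pvK true
  have hpw : (PySem.List.sorted xs pvK true).Pairwise (fun a b => pvK b ≤ pvK a) :=
    PySem.List.sorted_pairwise_rev xs pvK
  have hnd : (PySem.List.sorted xs pvK true).Nodup := hperm.nodup_iff.2 hx
  have hgt : (PySem.List.sorted xs pvK true).Pairwise (fun a b => pvK b < pvK a) :=
    (hpw.and hnd).imp fun hab =>
      lt_of_le_of_ne hab.1 fun he => hab.2 (pvK_injective he).symm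
  exact (PySem.List.sorted_rev_eq_of_perm_of_pairwise_gt ys
    (PySem.List.sorted xs pvK true) pvK (hperm.trans h) hgt).symm

-- ===== VERDICT (by name: the statement is the Claim_ definition above) =====
theorem point_name_first_components_spec : Claim_equal_point_name_first_components := by
  intro points _
  unfold Spec_point_name_first_components
  show point_name_first_components points = point_name_first_components_alt points
  unfold point_name_first_components point_name_first_components_alt
  rw [pv_sorted2_lex, pv_sorted2_lex, pv_items_eq, pv_counts_eq]
  have hfold : ((points.filter (fun name => decide (PySem.Str.find name "." ≥ 0))).map
      (fun name => PySem.Str.slice name none (some (PySem.Str.find name ".")))) = pvL points := rfl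
  rw [hfold]
  have hnd : ((PySem.Set.ofList (pvL points)).map
      (fun k => (k, ((pvL points).count k : Int)))).Nodup :=
    (PySem.Set.nodup_ofList (pvL points)).map
      (fun a b hab => congrArg Prod.fst hab)
  exact pv_sorted_rev_congr _ _ (pv_rle_perm (pvL points)).symm hnd
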